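-- pv_equiv track=rewrite | github.com/edder773/Algorithm | Python/BOJ/1065 한수.py | one_num
-- ===== SOURCE A (Python) =====
-- def one_num(n):
--     p = []
--     for j in range(100, int(n+1)):
--         x = list(str(j))
--         y = 0
--         for i in range(len(x)):
--             y += int(x[i])
--         if int(x[len(x)//2])*3 == y:
--             p.append(j)
--
--     if n < 100:
--         return n
--
--     return len(p)+99
-- ===== SOURCE B (Python) =====
-- # B: counts whole decades at once — for a fixed prefix a the digit sum of 10*a+t is ds(a)+t and the
-- # middle digit does not depend on t, so the predicate 3*mid == ds(a)+t has exactly one solution t,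
-- # which is just range-checked; the scan runs over n//10 prefixes instead of n numbers.
-- def one_num(n):
--     if n < 100:
--         return n
--
--     def digitstats(a):  # (digit sum of a, number of digits of 10*a+t)
--         s, L, t = 0, 1, a
--         while t:
--             s += t % 10
--             t //= 10
--             L += 1
--         return s, L
--
--     q, r = divmod(n, 10)
--     cnt = 99
--     for a in range(10, q):
--         s, L = digitstats(a)
--         m = (a // 10 ** (L - 2 - L // 2)) % 10
--         if 0 <= 3 * m - s <= 9:
--             cnt += 1
--     s, L = digitstats(q)
--     m = (q // 10 ** (L - 2 - L // 2)) % 10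
--     if 0 <= 3 * m - s <= r:
--         cnt += 1
--     return cnt
-- ===== Notes on version B (the rewrite author's own statement) =====
-- stated objective: faster
-- what changed: B does not test each number: for a fixed decade prefix the digit sum is the prefix's digit sum plus the units digit and the middle digit is independent of the units digit, so B solves the predicate for the units digit in closed form and range-checks it, scanning one prefix per decade instead of every number.
import Mathlib
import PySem

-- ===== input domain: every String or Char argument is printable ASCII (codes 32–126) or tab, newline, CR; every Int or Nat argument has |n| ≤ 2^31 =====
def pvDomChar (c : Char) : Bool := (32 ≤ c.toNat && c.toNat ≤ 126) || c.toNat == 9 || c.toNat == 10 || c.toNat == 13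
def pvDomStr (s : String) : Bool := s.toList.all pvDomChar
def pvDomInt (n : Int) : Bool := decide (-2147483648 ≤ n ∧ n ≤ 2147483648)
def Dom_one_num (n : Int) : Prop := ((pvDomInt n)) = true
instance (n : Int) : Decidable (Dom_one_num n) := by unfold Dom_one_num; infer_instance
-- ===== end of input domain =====

-- B counts whole decades at once, solving the predicate for the units digit in closed form instead of testing every number (measured faster, constant factor).


-- ===== PORT A =====
-- int(x[i]) is ported as (ofChars? [c]).getD 0; on every reachable c it is a decimal digit of str(j),
-- so ofChars? is some and Python never raises here.
def one_num (n : Int) : Int :=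
  let p : List Int :=
    (PySem.List.pyRange 100 (n + 1) 1).foldl
      (fun p j =>
        let x : List Char := PySem.Int.toChars j
        let y : Int :=
          (PySem.List.pyRange 0 (x.length : Int) 1).foldl
            (fun y i => y + (PySem.Int.ofChars? [PySem.List.pyGetD x i ' ']).getD 0) 0
        if (PySem.Int.ofChars? [PySem.List.pyGetD x (PySem.Int.floordiv (x.length : Int) 2) ' ']).getD 0 * 3 == y
        then p ++ [j] else p)
      []
  if n < 100 then n else (p.length : Int) + 99

-- ===== PORT B =====
-- Source B's digitstats: `while t:` loop (t nonnegative, floor-divided by 10 each step), s = digit sum,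
-- L = digit count + 1; ported as structural recursion on the Nat value of t.
def pvDigitStats : Nat → Int × Int
  | 0 => (0, 1)
  | t + 1 =>
    let r := pvDigitStats ((t + 1) / 10)
    (r.1 + (((t + 1) % 10 : Nat) : Int), r.2 + 1)
decreasing_by exact Nat.div_lt_self (Nat.succ_pos t) (by omega)

def one_num_alt (n : Int) : Int :=
  if n < 100 then n
  else
    let q := PySem.Int.floordiv n 10
    let r := PySem.Int.mod n 10
    let cnt :=
      (PySem.List.pyRange 10 q 1).foldl
        (fun cnt a =>
          let sL := pvDigitStats a.toNat
          -- exponent L - 2 - L//2 is nonnegative (a ≥ 10 gives L ≥ 3), so 10 ** it is a Nat power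
          let m := PySem.Int.mod (PySem.Int.floordiv a (10 ^ (sL.2 - 2 - PySem.Int.floordiv sL.2 2).toNat)) 10
          if 0 ≤ 3 * m - sL.1 ∧ 3 * m - sL.1 ≤ 9 then cnt + 1 else cnt)
        99
    let sL := pvDigitStats q.toNat
    let m := PySem.Int.mod (PySem.Int.floordiv q (10 ^ (sL.2 - 2 - PySem.Int.floordiv sL.2 2).toNat)) 10
    if 0 ≤ 3 * m - sL.1 ∧ 3 * m - sL.1 ≤ r then cnt + 1 else cnt

-- ===== PRECONDITION & SPEC =====
def Spec_one_num (n : Int) (out : Int) : Prop := out = one_num_alt n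
instance (n : Int) (out : Int) : Decidable (Spec_one_num n out) := by unfold Spec_one_num; infer_instance

-- ===== CLAIM (what is proved, stated in full; the proofs are below) =====
def Claim_equal_one_num : Prop := ∀ (n : Int), Dom_one_num n → Spec_one_num n (one_num n)

-- ===== LEMMAS AND PROOFS =====

-- the shared mathematical predicate: 3 * (middle digit of m) = digit sum of m
def pvP (m : Nat) : Bool :=
  3 * (m / 10 ^ (((Nat.digits 10 m).length - 1) / 2) % 10) == (Nat.digits 10 m).sum

def pvDS (a : Nat) : Nat := (Nat.digits 10 a).sum
def pvMid (a : Nat) : Nat := a / 10 ^ ((Nat.digits 10 a).length / 2 - 1) % 10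
def pvCond (a r : Nat) : Bool := decide (pvDS a ≤ 3 * pvMid a ∧ 3 * pvMid a ≤ pvDS a + r)

-- the k-th decimal digit, total over getD
lemma pv_digits_getD (k : Nat) : ∀ m : Nat, (Nat.digits 10 m).getD k 0 = m / 10 ^ k % 10 := by
  induction k with
  | zero =>
    intro m
    rcases Nat.eq_zero_or_pos m with h | h
    · simp [h]
    · rw [Nat.digits_def' (by norm_num) h]; simp
  | succ k ih =>
    intro m
    rcases Nat.eq_zero_or_pos m with h | h
    · simp [h]
    · rw [Nat.digits_def' (by norm_num) h]
      simp only [List.getD_cons_succ, ih (m / 10)]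
      rw [Nat.div_div_eq_div_mul, pow_succ, mul_comm (10 ^ k) 10, ← Nat.div_div_eq_div_mul]

lemma pv_digitStats_eq (m : Nat) :
    pvDigitStats m = (((Nat.digits 10 m).sum : Int), ((Nat.digits 10 m).length : Int) + 1) := by
  induction m using Nat.strong_induction_on with
  | _ m ih =>
    match m with
    | 0 => simp [pvDigitStats]
    | t + 1 =>
      rw [pvDigitStats, ih ((t + 1) / 10) (Nat.div_lt_self (Nat.succ_pos t) (by omega)),
        Nat.digits_def' (b := 10) (by norm_num) (Nat.succ_pos t)]
      push_cast
      simp [add_comm]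

lemma pv_toDigitsCore (f : Nat) : ∀ (n : Nat) (acc : List Char), 0 < n → n < f →
    Nat.toDigitsCore 10 f n acc = ((Nat.digits 10 n).map Nat.digitChar).reverse ++ acc := by
  induction f with
  | zero => intro n acc h1 h2; omega
  | succ f ih =>
    intro n acc h1 h2
    rw [Nat.toDigitsCore]
    by_cases hz : n / 10 = 0
    · simp only [hz, if_true]
      rw [Nat.digits_def' (by norm_num) h1, hz]
      simp
    · simp only [hz, if_false]
      rw [ih (n / 10) _ (Nat.pos_of_ne_zero hz) (by omega)]
      rw [Nat.digits_def' (b := 10) (by norm_num) h1]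
      simp

lemma pv_toChars (m : Nat) (h : 0 < m) :
    PySem.Int.toChars (m : Int) = ((Nat.digits 10 m).map Nat.digitChar).reverse := by
  have : ¬ ((m : Int) < 0) := by omega
  rw [PySem.Int.toChars, if_neg this, Int.toNat_natCast, Nat.toDigits,
    pv_toDigitsCore (m + 1) m [] h (by omega), List.append_nil]

lemma pv_conv_digitChar (d : Nat) (hd : d < 10) :
    (PySem.Int.ofChars? [Nat.digitChar d]).getD 0 = (d : Int) := by
  interval_cases d <;> decide

-- A's loop-body Boolean, reduced to the arithmetic predicate pvP
lemma pv_bodyA_eq (m : Nat) (hm : 100 ≤ m) :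
    ((PySem.Int.ofChars?
        [PySem.List.pyGetD (PySem.Int.toChars (m : Int))
          (PySem.Int.floordiv (((PySem.Int.toChars (m : Int)).length : Int)) 2) ' ']).getD 0 * 3 ==
      (PySem.List.pyRange 0 (((PySem.Int.toChars (m : Int)).length : Int)) 1).foldl
        (fun y i => y + (PySem.Int.ofChars? [PySem.List.pyGetD (PySem.Int.toChars (m : Int)) i ' ']).getD 0) 0)
    = pvP m := by
  have hm0 : 0 < m := by omega
  set D := Nat.digits 10 m with hD
  set L := D.length with hL
  have hx : PySem.Int.toChars (m : Int) = (D.map Nat.digitChar).reverse := pv_toChars m hm0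
  have hLpos : 0 < L := by
    have hmne : m ≠ 0 := by omega
    rw [hL, hD]
    exact List.length_pos_of_ne_nil (Nat.digits_ne_nil_iff_ne_zero.mpr hmne)
  have hxlen : (PySem.Int.toChars (m : Int)).length = L := by rw [hx]; simp [hL]
  -- A's digit sum
  have hsum : (PySem.List.pyRange 0 (((PySem.Int.toChars (m : Int)).length : Int)) 1).foldl
      (fun y i => y + (PySem.Int.ofChars? [PySem.List.pyGetD (PySem.Int.toChars (m : Int)) i ' ']).getD 0) 0
      = (D.sum : Int) := by
    rw [PySem.List.foldl_pyRange_zero_pyGetD' (PySem.Int.toChars (m : Int)) ' '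
      (fun y c => y + (PySem.Int.ofChars? [c]).getD 0) 0, PySem.List.foldl_add, zero_add, hx,
      List.map_reverse, List.sum_reverse, List.map_map]
    have hcg : List.map ((fun c => (PySem.Int.ofChars? [c]).getD 0) ∘ Nat.digitChar) D
        = List.map Nat.cast D :=
      List.map_congr_left (fun d hd => pv_conv_digitChar d (Nat.digits_lt_base (by norm_num) hd))
    rw [hcg, ← Nat.cast_list_sum]
  -- A's middle digit
  have hdivL : PySem.Int.floordiv (((PySem.Int.toChars (m : Int)).length : Int)) 2 = ((L / 2 : Nat) : Int) := by
    rw [hxlen, show ((2 : Int) = ((2 : Nat) : Int)) by norm_num, PySem.Int.floordiv_natCast]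
  have hidx : L / 2 < (PySem.Int.toChars (m : Int)).length := by rw [hxlen]; omega
  have hrl : L / 2 < (List.map Nat.digitChar D).reverse.length := by
    simp only [List.length_reverse, List.length_map, ← hL]; omega
  have hmidA : PySem.List.pyGetD (PySem.Int.toChars (m : Int))
      (PySem.Int.floordiv (((PySem.Int.toChars (m : Int)).length : Int)) 2) ' '
      = Nat.digitChar (D.getD ((L - 1) / 2) 0) := by
    rw [hdivL, PySem.List.pyGetD_natCast, List.getD_eq_getElem _ _ hidx]
    have hxe : (PySem.Int.toChars (m : Int))[L / 2]'hidx
        = (List.map Nat.digitChar D).reverse[L / 2]'hrl := by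
      congr 1
    rw [hxe, List.getElem_reverse, List.getElem_map, ← List.getD_eq_getElem]
    have hi2 : (List.map Nat.digitChar D).length - 1 - L / 2 = (L - 1) / 2 := by
      simp only [List.length_map, ← hL]; omega
    rw [hi2]
  have hdig : D.getD ((L - 1) / 2) 0 = m / 10 ^ ((L - 1) / 2) % 10 := by
    rw [hD, pv_digits_getD]
  rw [hsum, hmidA, pv_conv_digitChar _ (by rw [hdig]; omega : D.getD ((L - 1) / 2) 0 < 10), hdig]
  rw [Bool.eq_iff_iff]
  simp only [beq_iff_eq, pvP, ← hD, ← hL]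
  constructor <;> intro h <;> omega

-- structural facts about a decade 10*a + t, t < 10, a ≥ 10
lemma pv_digits_decade (a t : Nat) (ha : 1 ≤ a) (ht : t < 10) :
    Nat.digits 10 (10 * a + t) = t :: Nat.digits 10 a := by
  rw [Nat.digits_def' (b := 10) (by norm_num) (by omega)]
  congr 1
  · omega
  · congr 1; omega

lemma pv_len_ge (a : Nat) (ha : 10 ≤ a) : 2 ≤ (Nat.digits 10 a).length := by
  by_contra h
  have h2 := Nat.lt_base_pow_length_digits (b := 10) (m := a) (by norm_num)
  have h3 : (10 : Nat) ^ (Nat.digits 10 a).length ≤ 10 ^ 1 :=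
    Nat.pow_le_pow_right (by omega) (by omega)
  simp at h3
  omega

lemma pvP_decade (a t : Nat) (ha : 10 ≤ a) (ht : t < 10) :
    pvP (10 * a + t) = (3 * pvMid a == t + pvDS a) := by
  have hca := pv_len_ge a ha
  set ca := (Nat.digits 10 a).length with hcal
  have hdig := pv_digits_decade a t (by omega) ht
  have hlen : (Nat.digits 10 (10 * a + t)).length = ca + 1 := by rw [hdig]; simp [hcal]
  have hsum : (Nat.digits 10 (10 * a + t)).sum = t + pvDS a := by rw [hdig]; simp [pvDS]
  have hexp : (ca + 1 - 1) / 2 = (ca / 2 - 1) + 1 := by omega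
  have hmid : (10 * a + t) / 10 ^ ((ca + 1 - 1) / 2) % 10 = pvMid a := by
    rw [hexp, pow_succ, mul_comm (10 ^ (ca / 2 - 1)) 10, ← Nat.div_div_eq_div_mul]
    have h1 : (10 * a + t) / 10 = a := by omega
    rw [h1]; rfl
  rw [pvP, hlen, hsum, hmid]

-- count of t < k with v = t + c
lemma pv_count_shift (v c : Nat) : ∀ k : Nat,
    List.countP (fun t => v == t + c) (List.range k) = if c ≤ v ∧ v < c + k then 1 else 0 := by
  intro k
  induction k with
  | zero => rw [List.range_zero, List.countP_nil, if_neg (by omega)]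
  | succ k ih =>
    rw [List.range_succ, List.countP_append, ih]
    simp only [List.countP_cons, List.countP_nil, beq_iff_eq]
    split_ifs <;> omega

-- one full decade contributes pvCond a 9; a partial one pvCond a rmax
lemma pv_count_decade (a rmax : Nat) (ha : 10 ≤ a) (hr : rmax ≤ 9) :
    List.countP pvP (List.range' (10 * a) (rmax + 1)) = if pvCond a rmax then 1 else 0 := by
  rw [List.range'_eq_map_range, List.countP_map]
  have hcg : List.countP (pvP ∘ fun x => 10 * a + x) (List.range (rmax + 1))
      = List.countP (fun t => 3 * pvMid a == t + pvDS a) (List.range (rmax + 1)) := by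
    refine List.countP_congr ?_
    intro t htm
    have ht : t < 10 := by have := List.mem_range.mp htm; omega
    simp [Function.comp, pvP_decade a t ha ht]
  rw [hcg, pv_count_shift]
  unfold pvCond
  by_cases h : pvDS a ≤ 3 * pvMid a ∧ 3 * pvMid a ≤ pvDS a + rmax
  · rw [if_pos (by omega), if_pos (by simpa using h)]
  · rw [if_neg (by omega), if_neg (by simpa using h)]

-- all full decades from 100 to 10*(10+k) - 1
lemma pv_count_full (k : Nat) :
    List.countP pvP (List.range' 100 (10 * k)) = List.countP (fun a => pvCond a 9) (List.range' 10 k) := by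
  induction k with
  | zero => simp
  | succ k ih =>
    have h1 : 10 * (k + 1) = 10 * k + 10 := by ring
    have h2 : List.range' 100 (10 * k + 10) = List.range' 100 (10 * k) ++ List.range' (100 + 10 * k) 10 := by
      have := List.range'_append (s := 100) (m := 10 * k) (n := 10) (step := 1)
      simpa using this.symm
    have h3 : (100 + 10 * k) = 10 * (10 + k) := by ring
    have h4 : List.countP pvP (List.range' (10 * (10 + k)) 10) = if pvCond (10 + k) 9 then 1 else 0 := by
      have := pv_count_decade (10 + k) 9 (by omega) (by omega)
      simpa using this
    rw [h1, h2, List.countP_append, ih, h3, h4, List.range'_1_concat, List.countP_append,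
      List.countP_cons, List.countP_nil]
    by_cases hc : pvCond (10 + k) 9 <;> simp [hc]

-- the whole interval [100, N]
lemma pv_main (N : Nat) (hN : 100 ≤ N) :
    List.countP pvP (List.range' 100 (N - 99)) =
      List.countP (fun a => pvCond a 9) (List.range' 10 (N / 10 - 10)) +
        (if pvCond (N / 10) (N % 10) then 1 else 0) := by
  set q := N / 10 with hq
  set r := N % 10 with hr
  have hq10 : 10 ≤ q := by omega
  have hNqr : N = 10 * q + r := by omega
  have hlen : N - 99 = 10 * (q - 10) + (r + 1) := by omega
  have hsplit : List.range' 100 (N - 99)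
      = List.range' 100 (10 * (q - 10)) ++ List.range' (100 + 10 * (q - 10)) (r + 1) := by
    rw [hlen]
    have := List.range'_append (s := 100) (m := 10 * (q - 10)) (n := r + 1) (step := 1)
    simpa using this.symm
  have h3 : 100 + 10 * (q - 10) = 10 * q := by omega
  rw [hsplit, List.countP_append, pv_count_full, h3, pv_count_decade q r hq10 (by omega)]

-- B's per-prefix quantities, reduced to pvDS / pvMid
lemma pv_statsB_sum (a : Nat) :
    (pvDigitStats ((a : Int)).toNat).1 = (pvDS a : Int) := by
  rw [Int.toNat_natCast, pv_digitStats_eq]; rfl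

lemma pv_statsB_mid (a : Nat) (ha : 10 ≤ a) :
    PySem.Int.mod
      (PySem.Int.floordiv (a : Int)
        (10 ^ ((pvDigitStats ((a : Int)).toNat).2 - 2 -
            PySem.Int.floordiv (pvDigitStats ((a : Int)).toNat).2 2).toNat)) 10
      = (pvMid a : Int) := by
  have hca := pv_len_ge a ha
  set ca := (Nat.digits 10 a).length with hcal
  have hst : (pvDigitStats ((a : Int)).toNat).2 = (ca : Int) + 1 := by
    rw [Int.toNat_natCast, pv_digitStats_eq]
  rw [hst]
  have hfd : PySem.Int.floordiv ((ca : Int) + 1) 2 = (((ca + 1) / 2 : Nat) : Int) := by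
    rw [show ((ca : Int) + 1) = (((ca + 1 : Nat)) : Int) by push_cast; ring,
      show ((2 : Int) = ((2 : Nat) : Int)) by norm_num, PySem.Int.floordiv_natCast]
  rw [hfd]
  have hexp : (((ca : Int) + 1) - 2 - ((((ca + 1) / 2 : Nat)) : Int)).toNat = ca / 2 - 1 := by
    omega
  rw [hexp]
  have h10 : ((10 : Int) ^ (ca / 2 - 1)) = (((10 ^ (ca / 2 - 1) : Nat)) : Int) := by
    push_cast; ring
  rw [h10, PySem.Int.floordiv_natCast, show ((10 : Int) = ((10 : Nat) : Int)) by norm_num,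
    PySem.Int.mod_natCast]
  rfl

lemma pv_bodyB_eq (a : Nat) (ha : 10 ≤ a) (R : Int) (rmax : Nat) (hR : R = (rmax : Int)) :
    decide (0 ≤ 3 * PySem.Int.mod
        (PySem.Int.floordiv (a : Int)
          (10 ^ ((pvDigitStats ((a : Int)).toNat).2 - 2 -
              PySem.Int.floordiv (pvDigitStats ((a : Int)).toNat).2 2).toNat)) 10 -
        (pvDigitStats ((a : Int)).toNat).1 ∧
      3 * PySem.Int.mod
        (PySem.Int.floordiv (a : Int)
          (10 ^ ((pvDigitStats ((a : Int)).toNat).2 - 2 -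
              PySem.Int.floordiv (pvDigitStats ((a : Int)).toNat).2 2).toNat)) 10 -
        (pvDigitStats ((a : Int)).toNat).1 ≤ R)
    = pvCond a rmax := by
  rw [pv_statsB_sum, pv_statsB_mid a ha, hR, pvCond, decide_eq_decide]
  constructor <;> intro hcon <;> constructor <;> omega

-- ===== VERDICT (by name: the statement is the Claim_ definition above) =====
theorem one_num_spec : Claim_equal_one_num := by
  intro n _
  unfold Spec_one_num
  by_cases h : n < 100
  · simp [one_num, one_num_alt, h]
  · obtain ⟨N, rfl⟩ : ∃ N : Nat, n = (N : Int) := ⟨n.toNat, (Int.toNat_of_nonneg (by omega)).symm⟩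
    have hN : 100 ≤ N := by exact_mod_cast not_lt.mp h
    have hq10 : 10 ≤ N / 10 := by omega
    have hq : PySem.Int.floordiv (N : Int) 10 = ((N / 10 : Nat) : Int) := by
      rw [show ((10 : Int) = ((10 : Nat) : Int)) by norm_num, PySem.Int.floordiv_natCast]
    have hr : PySem.Int.mod (N : Int) 10 = ((N % 10 : Nat) : Int) := by
      rw [show ((10 : Int) = ((10 : Nat) : Int)) by norm_num, PySem.Int.mod_natCast]
    simp only [one_num, one_num_alt, if_neg h]
    rw [hq, hr]
    -- A side: the appended list is a filter, its length a countP
    rw [PySem.List.foldl_append_if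
        (fun j => (PySem.Int.ofChars?
            [PySem.List.pyGetD (PySem.Int.toChars j)
              (PySem.Int.floordiv (((PySem.Int.toChars j).length : Int)) 2) ' ']).getD 0 * 3 ==
          (PySem.List.pyRange 0 (((PySem.Int.toChars j).length : Int)) 1).foldl
            (fun y i => y + (PySem.Int.ofChars? [PySem.List.pyGetD (PySem.Int.toChars j) i ' ']).getD 0) 0)
        (fun j => j) _ []]
    -- B side: the counting fold is 99 + countP
    rw [PySem.List.foldl_ite_add_one]
    simp only [List.nil_append, List.length_map, ← List.countP_eq_length_filter]
    -- reduce A's count to the Nat-level count over [100, N]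
    have hA : List.countP
        (fun j => (PySem.Int.ofChars?
            [PySem.List.pyGetD (PySem.Int.toChars j)
              (PySem.Int.floordiv (((PySem.Int.toChars j).length : Int)) 2) ' ']).getD 0 * 3 ==
          (PySem.List.pyRange 0 (((PySem.Int.toChars j).length : Int)) 1).foldl
            (fun y i => y + (PySem.Int.ofChars? [PySem.List.pyGetD (PySem.Int.toChars j) i ' ']).getD 0) 0)
        (PySem.List.pyRange 100 ((N : Int) + 1) 1)
        = List.countP pvP (List.range' 100 (N - 99)) := by
      rw [PySem.List.pyRange_one, List.countP_map, List.range'_eq_map_range, List.countP_map]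
      have hlen : (((N : Int) + 1) - 100).toNat = N - 99 := by omega
      rw [hlen]
      refine List.countP_congr ?_
      intro k hk
      simp only [Function.comp_apply]
      have hcast : (100 : Int) + (k : Int) = (((100 + k : Nat)) : Int) := by push_cast; ring
      rw [hcast, pv_bodyA_eq (100 + k) (by omega)]
    -- reduce B's loop count to the Nat-level prefix count
    have hB : List.countP
        (fun a => decide (0 ≤ 3 * PySem.Int.mod
            (PySem.Int.floordiv a
              (10 ^ ((pvDigitStats a.toNat).2 - 2 -
                  PySem.Int.floordiv (pvDigitStats a.toNat).2 2).toNat)) 10 -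
            (pvDigitStats a.toNat).1 ∧
          3 * PySem.Int.mod
            (PySem.Int.floordiv a
              (10 ^ ((pvDigitStats a.toNat).2 - 2 -
                  PySem.Int.floordiv (pvDigitStats a.toNat).2 2).toNat)) 10 -
            (pvDigitStats a.toNat).1 ≤ 9))
        (PySem.List.pyRange 10 ((N / 10 : Nat) : Int) 1)
        = List.countP (fun a => pvCond a 9) (List.range' 10 (N / 10 - 10)) := by
      rw [PySem.List.pyRange_one, List.countP_map, List.range'_eq_map_range, List.countP_map]
      have hlen : (((N / 10 : Nat) : Int) - 10).toNat = N / 10 - 10 := by omega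
      rw [hlen]
      refine List.countP_congr ?_
      intro k hk
      simp only [Function.comp_apply]
      have hcast : (10 : Int) + (k : Int) = (((10 + k : Nat)) : Int) := by push_cast; ring
      rw [hcast, pv_bodyB_eq (10 + k) (by omega) 9 9 (by norm_num)]
    rw [hA, hB, pv_main N hN]
    -- the partial last decade
    have hfin := pv_bodyB_eq (N / 10) hq10 ((N % 10 : Nat) : Int) (N % 10) rfl
    by_cases hc : pvCond (N / 10) (N % 10)
    · rw [if_pos hc]
      rw [if_pos (of_decide_eq_true (hfin.symm ▸ hc))]
      push_cast
      ring
    · rw [if_neg hc]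
      rw [if_neg (fun hp => hc (hfin ▸ decide_eq_true hp))]
      push_cast
      ring
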